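-- pv_equiv track=rewrite | github.com/pinellolab/CRISPResso2 | scripts/countHighQualityBases.py | get_ref_coordinates_from_aln
-- ===== SOURCE A (Python) =====
-- def get_ref_coordinates_from_aln(read_aln, ref_aln):
--     """Get the reference coordinates from the read and reference alignments
--     So if we want to check the base at the 5th base in the reference, we would go to the ref_pos_in_aln[5]th position in the alignment
--     If we want to get the base in the read corresponding to the 5th base in the reference, we would go to the ref_pos_in_read[5]th position in the read
--
--     Args:
--         read_aln (str): read alignment
--         ref_aln (str): reference alignment
--
--     Returns:
--         arr(int): array of reference positions in the alignment
--         arr(int): array of reference positions in the read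
--
--     """
--     read_pos = -1
--     ref_pos_in_aln = []  # list of reference positions in the alignment
--     ref_pos_in_read = []  # list of reference positions in the read
--     for i in range(len(read_aln)):
--         if read_aln[i] != "-":
--             read_pos += 1
--         if ref_aln[i] != "-":
--             ref_pos_in_aln.append(i)
--             ref_pos_in_read.append(read_pos)
--
--     return (ref_pos_in_aln, ref_pos_in_read)
-- ===== SOURCE B (Python) =====
-- def get_ref_coordinates_from_aln(read_aln, ref_aln):
--     # Prefix-count table over the read, then a filter/lookup pass over the reference.
--     prefix = []
--     c = 0
--     for ch in read_aln:
--         if ch != "-":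
--             c += 1
--         prefix.append(c)
--     ref_pos_in_aln = [i for i in range(len(read_aln)) if ref_aln[i] != "-"]
--     ref_pos_in_read = [prefix[i] - 1 for i in ref_pos_in_aln]
--     return (ref_pos_in_aln, ref_pos_in_read)
-- ===== Notes on version B (the rewrite author's own statement) =====
-- stated objective: alternative
-- what changed: Replaces A's single coupled loop carrying a running read position with a two-pass decomposition: first build a prefix table of non-dash counts over the read, then filter the reference positions and look the read positions up in the table.
import Mathlib
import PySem

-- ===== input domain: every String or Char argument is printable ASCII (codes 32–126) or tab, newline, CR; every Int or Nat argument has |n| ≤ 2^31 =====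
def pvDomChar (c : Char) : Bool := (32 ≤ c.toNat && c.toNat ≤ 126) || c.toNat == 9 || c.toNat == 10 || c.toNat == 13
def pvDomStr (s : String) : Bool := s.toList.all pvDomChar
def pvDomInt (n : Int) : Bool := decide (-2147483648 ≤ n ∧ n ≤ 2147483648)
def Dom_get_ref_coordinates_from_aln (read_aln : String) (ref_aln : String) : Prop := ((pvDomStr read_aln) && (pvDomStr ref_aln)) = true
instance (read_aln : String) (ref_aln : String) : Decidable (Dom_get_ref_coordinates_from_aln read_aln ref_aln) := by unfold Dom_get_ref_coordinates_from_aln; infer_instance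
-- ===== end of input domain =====

-- B replaces A's single coupled loop by a prefix-count table over the read plus a filter/lookup
-- pass over the reference (alternative decomposition, same O(n) cost).


-- ===== PORT A =====
-- single loop over range(len(read_aln)) carrying (read_pos, ref_pos_in_aln, ref_pos_in_read);
-- indexing is via getD, which is exact under Pre_ (all indices in range there).
def get_ref_coordinates_from_aln (read_aln : String) (ref_aln : String) : List Int × List Int :=
  let rs := read_aln.toList
  let fs := ref_aln.toList
  let st := (List.range rs.length).foldl
    (fun (st : Int × List Int × List Int) i =>
      let read_pos := if rs.getD i ' ' ≠ '-' then st.1 + 1 else st.1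
      if fs.getD i ' ' ≠ '-' then
        (read_pos, st.2.1 ++ [(i : Int)], st.2.2 ++ [read_pos])
      else
        (read_pos, st.2.1, st.2.2))
    (-1, [], [])
  (st.2.1, st.2.2)

-- ===== PORT B =====
-- pass 1: prefix table of non-dash counts over the read; pass 2: filter reference positions,
-- then map table lookups.
def get_ref_coordinates_from_aln_alt (read_aln : String) (ref_aln : String) : List Int × List Int :=
  let rs := read_aln.toList
  let fs := ref_aln.toList
  let pfx := (rs.foldl
    (fun (acc : Int × List Int) ch =>
      let c := if ch ≠ '-' then acc.1 + 1 else acc.1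
      (c, acc.2 ++ [c]))
    (0, [])).2
  let ref_pos_in_aln := (List.range rs.length).filter (fun i => fs.getD i ' ' ≠ '-')
  (ref_pos_in_aln.map (fun i => (i : Int)),
   ref_pos_in_aln.map (fun i => pfx.getD i 0 - 1))

-- ===== PRECONDITION & SPEC =====
-- Pre_ excludes exactly the inputs where Python's ref_aln[i] raises IndexError: the reference
-- alignment shorter than the read alignment.
def Pre_get_ref_coordinates_from_aln (read_aln : String) (ref_aln : String) : Prop :=
  read_aln.toList.length ≤ ref_aln.toList.length
instance (read_aln : String) (ref_aln : String) : Decidable (Pre_get_ref_coordinates_from_aln read_aln ref_aln) := by unfold Pre_get_ref_coordinates_from_aln; infer_instance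
def pvWitness_get_ref_coordinates_from_aln : String × String := ("AC-G", "AC-TG")

def Spec_get_ref_coordinates_from_aln (read_aln : String) (ref_aln : String) (out : List Int × List Int) : Prop := out = get_ref_coordinates_from_aln_alt read_aln ref_aln
instance (read_aln : String) (ref_aln : String) (out : List Int × List Int) : Decidable (Spec_get_ref_coordinates_from_aln read_aln ref_aln out) := by unfold Spec_get_ref_coordinates_from_aln; infer_instance

-- ===== CLAIM (what is proved, stated in full; the proofs are below) =====
def Claim_equal_get_ref_coordinates_from_aln : Prop := ∀ (read_aln : String) (ref_aln : String), Dom_get_ref_coordinates_from_aln read_aln ref_aln → Pre_get_ref_coordinates_from_aln read_aln ref_aln → Spec_get_ref_coordinates_from_aln read_aln ref_aln (get_ref_coordinates_from_aln read_aln ref_aln)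

-- ===== LEMMAS AND PROOFS =====

-- number of non-dash characters, as an Int
def pcount (l : List Char) : Int := ((l.filter (fun c => c ≠ '-')).length : Int)

theorem pcount_append (l m : List Char) : pcount (l ++ m) = pcount l + pcount m := by
  simp [pcount, List.filter_append]

-- what B's first fold produces, as a recursive function
def prefList (c : Int) (rs : List Char) : List Int :=
  match rs with
  | [] => []
  | ch :: t =>
    let c' := if ch ≠ '-' then c + 1 else c
    c' :: prefList c' t

theorem foldl_prefix_eq (rs : List Char) : ∀ (c : Int) (acc : List Int),
    rs.foldl (fun (acc : Int × List Int) ch =>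
      let c := if ch ≠ '-' then acc.1 + 1 else acc.1
      (c, acc.2 ++ [c])) (c, acc)
    = (c + pcount rs, acc ++ prefList c rs) := by
  induction rs with
  | nil => intro c acc; simp [pcount, prefList]
  | cons ch t ih =>
    intro c acc
    rw [List.foldl_cons]
    show List.foldl
        (fun (acc : Int × List Int) ch =>
          let c := if ch ≠ '-' then acc.1 + 1 else acc.1
          (c, acc.2 ++ [c]))
        ((if ch ≠ '-' then c + 1 else c), acc ++ [if ch ≠ '-' then c + 1 else c]) t
      = (c + pcount (ch :: t), acc ++ prefList c (ch :: t))
    by_cases h : ch = '-'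
    · rw [if_neg (by simp [h]), ih]
      simp [prefList, pcount, List.filter_cons, h]
    · rw [if_pos h, ih]
      have hp : pcount (ch :: t) = 1 + pcount t := by
        simp [pcount, List.filter_cons, h]; omega
      refine Prod.ext ?_ ?_
      · simp [hp]; ring
      · simp [prefList, h]

theorem prefList_getD (rs : List Char) : ∀ (c : Int) (i : ℕ), i < rs.length →
    (prefList c rs).getD i 0 = c + pcount (rs.take (i + 1)) := by
  induction rs with
  | nil => intro c i h; simp at h
  | cons ch t ih =>
    intro c i h
    have hpl : prefList c (ch :: t)
        = (if ch ≠ '-' then c + 1 else c) :: prefList (if ch ≠ '-' then c + 1 else c) t := rfl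
    cases i with
    | zero =>
      by_cases hd : ch = '-' <;>
        simp [prefList, pcount, List.filter_cons, hd]
    | succ j =>
      have hj : j < t.length := by simpa using h
      by_cases hd : ch = '-'
      · rw [hpl, if_neg (by simp [hd]), List.getD_cons_succ]
        have hpc : pcount ((ch :: t).take (j + 1 + 1)) = pcount (t.take (j + 1)) := by
          simp [pcount, List.filter_cons, hd]
        rw [hpc]
        exact ih c j hj
      · rw [hpl, if_pos hd, List.getD_cons_succ]
        have hpc : pcount ((ch :: t).take (j + 1 + 1)) = 1 + pcount (t.take (j + 1)) := by
          simp [pcount, List.filter_cons, hd]; omega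
        rw [hpc, ih (c + 1) j hj]
        ring

theorem pcount_take_succ (rs : List Char) (n : ℕ) (hn : n < rs.length) :
    pcount (rs.take (n + 1)) =
      pcount (rs.take n) + (if rs.getD n ' ' ≠ '-' then 1 else 0) := by
  have h1 : rs.take (n + 1) = rs.take n ++ [rs.getD n ' '] := by
    rw [List.getD_eq_getElem _ _ hn]
    exact List.take_succ_eq_append_getElem hn
  rw [h1, pcount_append]
  simp only [List.getD] at *
  by_cases h : rs[n]?.getD ' ' = '-'
  · rw [if_neg (by simp [h])]
    simp [pcount, List.filter_cons, h]
  · rw [if_pos h]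
    simp [pcount, List.filter_cons, h]

-- characterisation of A's loop after n steps
theorem loopA_eq (rs fs : List Char) : ∀ n, n ≤ rs.length →
    (List.range n).foldl
      (fun (st : Int × List Int × List Int) i =>
        let read_pos := if rs.getD i ' ' ≠ '-' then st.1 + 1 else st.1
        if fs.getD i ' ' ≠ '-' then
          (read_pos, st.2.1 ++ [(i : Int)], st.2.2 ++ [read_pos])
        else
          (read_pos, st.2.1, st.2.2))
      (-1, [], [])
    = (pcount (rs.take n) - 1,
       ((List.range n).filter (fun i => fs.getD i ' ' ≠ '-')).map (fun i => (i : Int)),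
       ((List.range n).filter (fun i => fs.getD i ' ' ≠ '-')).map
         (fun i => pcount (rs.take (i + 1)) - 1)) := by
  intro n hn
  induction n with
  | zero => simp [pcount]
  | succ m ih =>
    have hm : m ≤ rs.length := Nat.le_of_succ_le hn
    have hmlt : m < rs.length := hn
    rw [List.range_succ, List.foldl_append, ih hm]
    simp only [List.foldl_cons, List.foldl_nil, List.filter_append, List.map_append,
      List.filter_cons, List.filter_nil]
    have hstep := pcount_take_succ rs m hmlt
    by_cases hf : fs.getD m ' ' = '-' <;> by_cases hr : rs.getD m ' ' = '-' <;>
      simp only [List.getD] at hf hr hstep ⊢ <;>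
      simp [hf, hr, Prod.ext_iff] at hstep ⊢ <;> omega

-- ===== VERDICT (by name: the statement is the Claim_ definition above) =====
theorem get_ref_coordinates_from_aln_spec : Claim_equal_get_ref_coordinates_from_aln := by
  intro read_aln ref_aln _ _
  unfold Spec_get_ref_coordinates_from_aln
  unfold get_ref_coordinates_from_aln get_ref_coordinates_from_aln_alt
  simp only [foldl_prefix_eq _ 0 [], List.nil_append,
    loopA_eq read_aln.toList ref_aln.toList read_aln.toList.length (le_refl _)]
  refine Prod.ext rfl ?_
  apply List.map_congr_left
  intro i hi
  have hlt : i < read_aln.toList.length := List.mem_range.mp (List.mem_filter.mp hi).1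
  rw [prefList_getD _ 0 i hlt]
  omega
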